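-- pv_equiv track=rewrite | github.com/Velascat/OperatorConsole | src/operator_console/tab_capture.py | _filter_chrome
-- ===== SOURCE A (Python) =====
-- def _filter_chrome(lines: list[str]) -> list[str]:
--     """Remove tab-bar and status-bar chrome pane blocks."""
--     result: list[str] = []
--     block: list[str] = []
--     depth = 0
--
--     for line in lines:
--         for ch in line:
--             if ch == "{":
--                 depth += 1
--             elif ch == "}":
--                 depth -= 1
--         block.append(line)
--         if depth == 0 and block:
--             text = "\n".join(block)
--             is_chrome = (
--                 'plugin location="zellij:tab-bar"' in text
--                 or 'plugin location="zellij:status-bar"' in text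
--                 or 'plugin location="tab-bar"' in text
--                 or 'plugin location="status-bar"' in text
--             )
--             if not is_chrome:
--                 result.extend(block)
--             block = []
--
--     return result
-- ===== SOURCE B (Python) =====
-- _CHROME_MARKERS = (
--     'plugin location="zellij:tab-bar"',
--     'plugin location="zellij:status-bar"',
--     'plugin location="tab-bar"',
--     'plugin location="status-bar"',
-- )
--
--
-- def _block_end(lines):
--     """Index just past the first brace-balanced prefix block, or None."""
--     depth = 0
--     for i, line in enumerate(lines):
--         depth += line.count("{") - line.count("}")
--         if depth == 0:
--             return i + 1
--     return None
--
--
-- def _filter_chrome(lines):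
--     """Remove tab-bar and status-bar chrome pane blocks.
--
--     Worklist loop: repeatedly split the first brace-balanced block off the
--     remaining lines and keep it unless some of its lines contains a chrome
--     marker (markers contain no newline, so a per-line test equals testing
--     the newline-joined block text); an unbalanced tail yields nothing.
--     """
--     result = []
--     rest = lines
--     while True:
--         end = _block_end(rest)
--         if end is None:
--             return result
--         block, rest = rest[:end], rest[end:]
--         if not any(any(m in line for m in _CHROME_MARKERS) for line in block):
--             result += block
-- ===== Notes on version B (the rewrite author's own statement) =====
-- stated objective: alternative
-- what changed: B is a worklist loop instead of A's single accumulating pass: a helper finds the index past the first brace-balanced block (per-line depth change via str.count), B slices that block off the remaining lines, tests each of its lines for a chrome marker (markers contain no newline, so the per-line test equals A's substring test on the newline-joined block) and repeats on the remainder; it trades A's running accumulators for repeated list splitting.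
import Mathlib
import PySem

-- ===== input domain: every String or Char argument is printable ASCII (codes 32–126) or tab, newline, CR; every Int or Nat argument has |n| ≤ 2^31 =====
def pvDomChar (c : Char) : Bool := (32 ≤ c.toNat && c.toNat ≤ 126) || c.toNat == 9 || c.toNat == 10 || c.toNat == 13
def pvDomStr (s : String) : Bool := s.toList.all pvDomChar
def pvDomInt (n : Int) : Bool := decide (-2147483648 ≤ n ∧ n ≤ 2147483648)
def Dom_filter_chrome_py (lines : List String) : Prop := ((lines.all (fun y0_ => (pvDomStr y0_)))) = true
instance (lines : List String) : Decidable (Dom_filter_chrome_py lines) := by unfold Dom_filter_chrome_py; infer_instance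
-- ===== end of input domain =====

-- B is a worklist loop instead of A's single accumulating pass: it repeatedly splits
-- the first brace-balanced block off the remaining lines and tests each of its lines
-- for a chrome marker (markers contain no newline, so the per-line test equals A's
-- test on the newline-joined block); objective: alternative decomposition.

-- ===== PORT A =====
-- 'is_chrome' test of A: the four 'in' tests, or-chained, on the joined block text
def pvIsChromeA (text : String) : Bool :=
  PySem.Str.isIn "plugin location=\"zellij:tab-bar\"" text
  || PySem.Str.isIn "plugin location=\"zellij:status-bar\"" text
  || PySem.Str.isIn "plugin location=\"tab-bar\"" text
  || PySem.Str.isIn "plugin location=\"status-bar\"" text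

-- the inner 'for ch in line' depth loop of A
def pvDepthA (d : Int) (line : String) : Int :=
  line.toList.foldl (fun d ch => if ch = '{' then d + 1 else if ch = '}' then d - 1 else d) d

-- one iteration of A's 'for line in lines' loop; state = (result, block, depth)
def pvStepA (st : List String × List String × Int) (line : String) :
    List String × List String × Int :=
  let depth := pvDepthA st.2.2 line
  let block := st.2.1 ++ [line]
  if depth = 0 ∧ block ≠ [] then
    if pvIsChromeA (PySem.Str.join "\n" block) then (st.1, ([], 0))
    else (st.1 ++ block, ([], 0))
  else (st.1, (block, depth))

def filter_chrome_py (lines : List String) : List String :=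
  (lines.foldl pvStepA (([] : List String), (([] : List String), (0 : Int)))).1

-- ===== PORT B =====
def pvChromeMarkers : List String :=
  ["plugin location=\"zellij:tab-bar\"", "plugin location=\"zellij:status-bar\"",
   "plugin location=\"tab-bar\"", "plugin location=\"status-bar\""]

-- B's per-line depth change: line.count("{") - line.count("}")
def pvDelta (line : String) : Int :=
  (PySem.Str.count line "{" : Int) - (PySem.Str.count line "}" : Int)

-- B's _block_end: index just past the first brace-balanced prefix block, or None
def pvBlockEnd (d : Int) : List String → Option Nat
  | [] => none
  | line :: rest =>
    let d' := d + pvDelta line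
    if d' = 0 then some 1 else (pvBlockEnd d' rest).map (· + 1)

-- B's per-line chrome test: any(m in line for m in _CHROME_MARKERS)
def pvLineChrome (line : String) : Bool :=
  pvChromeMarkers.any (fun m => PySem.Str.isIn m line)

theorem pvBlockEnd_ge_one (d : Int) (l : List String) (n : Nat)
    (h : pvBlockEnd d l = some n) : 1 ≤ n := by
  induction l generalizing d n with
  | nil => simp [pvBlockEnd] at h
  | cons a t ih =>
    simp only [pvBlockEnd] at h
    split at h
    · injection h with h2; omega
    · cases hk : pvBlockEnd (d + pvDelta a) t with
      | none => rw [hk] at h; simp at h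
      | some k =>
        rw [hk] at h; simp only [Option.map_some] at h
        injection h with h2; omega

-- B's while loop: state = (result, rest); one recursive step per balanced block
def pvFilterGo (res : List String) (rest : List String) : List String :=
  match h : pvBlockEnd 0 rest with
  | none => res
  | some n =>
    let block := rest.take n
    let rest' := rest.drop n
    if block.any pvLineChrome then pvFilterGo res rest'
    else pvFilterGo (res ++ block) rest'
termination_by rest.length
decreasing_by
  all_goals
    have h1 := pvBlockEnd_ge_one 0 rest n h
    have h2 : rest ≠ [] := by rintro rfl; simp [pvBlockEnd] at h
    have h3 : 0 < rest.length := List.length_pos_iff.mpr h2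
    simp only [List.length_drop]; omega

def filter_chrome_py_alt (lines : List String) : List String :=
  pvFilterGo [] lines

-- ===== PRECONDITION & SPEC =====
def Spec_filter_chrome_py (lines : List String) (out : List String) : Prop := out = filter_chrome_py_alt lines
instance (lines : List String) (out : List String) : Decidable (Spec_filter_chrome_py lines out) := by unfold Spec_filter_chrome_py; infer_instance

-- ===== CLAIM =====
def Claim_equal_filter_chrome_py : Prop := ∀ (lines : List String), Dom_filter_chrome_py lines → Spec_filter_chrome_py lines (filter_chrome_py lines)

-- ===== LEMMAS AND PROOFS =====

-- single-character substring count is character count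
theorem pv_go_single (c : Char) : ∀ (l : List Char) (fuel acc : Nat), l.length ≤ fuel →
    PySem.Chars.count.go [c] fuel l acc = acc + l.count c := by
  intro l
  induction l with
  | nil => intro fuel acc h; cases fuel <;> simp [PySem.Chars.count.go]
  | cons hd t ih =>
    intro fuel acc h
    cases fuel with
    | zero => simp at h
    | succ f =>
      simp only [PySem.Chars.count.go]
      by_cases hc : hd = c
      · have hrec := ih f (acc + 1) (by simpa using h)
        simp [hc, List.isPrefixOf, hrec]; omega
      · have hrec := ih f acc (by simpa using h)
        rw [if_neg (by simp [List.isPrefixOf, Ne.symm hc])]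
        rw [hrec]; simp [hc]

theorem pv_count_single (cs : List Char) (c : Char) :
    PySem.Chars.count cs [c] = cs.count c := by
  simp [PySem.Chars.count, pv_go_single c cs cs.length 0 le_rfl]

-- A's char loop computes B's count-based delta
theorem pv_depthA_eq (d : Int) (line : String) : pvDepthA d line = d + pvDelta line := by
  have h1 : PySem.Str.count line "{" = line.toList.count '{' := by
    rw [PySem.Str.count_eq]
    have : "{".toList = ['{'] := by decide
    rw [this, pv_count_single]
  have h2 : PySem.Str.count line "}" = line.toList.count '}' := by
    rw [PySem.Str.count_eq]
    have : "}".toList = ['}'] := by decide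
    rw [this, pv_count_single]
  unfold pvDepthA pvDelta
  rw [h1, h2]
  induction line.toList generalizing d with
  | nil => simp
  | cons hd t ih =>
    simp only [List.foldl_cons, List.count_cons]
    rw [ih]
    by_cases h1 : hd = '{'
    · simp [h1]; omega
    · by_cases h2 : hd = '}'
      · simp [h2]; omega
      · simp [h1, h2]

-- a needle avoiding x is a prefix of a ++ x :: c iff it is a prefix of a
theorem pv_prefix_append_cons (x : Char) (c : List Char) :
    ∀ (m a : List Char), x ∉ m → (m <+: a ++ x :: c ↔ m <+: a) := by
  intro m
  induction m with
  | nil => intro a _; simp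
  | cons h t ih =>
    intro a hx
    cases a with
    | nil =>
      simp only [List.nil_append, List.cons_prefix_cons]
      constructor
      · rintro ⟨rfl, _⟩; exact absurd List.mem_cons_self hx
      · intro hp
        exact absurd (List.prefix_nil.mp hp) (List.cons_ne_nil h t)
    | cons y a' =>
      simp only [List.cons_append, List.cons_prefix_cons]
      constructor
      · rintro ⟨rfl, ht⟩
        exact ⟨rfl, (ih a' (fun hm => hx (List.mem_cons_of_mem _ hm))).mp ht⟩
      · rintro ⟨rfl, ht⟩
        exact ⟨rfl, (ih a' (fun hm => hx (List.mem_cons_of_mem _ hm))).mpr ht⟩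

-- a needle avoiding x is an infix of a ++ x :: c iff it is an infix of a or of c
theorem pv_infix_append_cons (x : Char) (c m : List Char) (hx : x ∉ m) :
    ∀ (a : List Char), (m <:+: a ++ x :: c ↔ m <:+: a ∨ m <:+: c) := by
  intro a
  induction a with
  | nil =>
    rw [List.nil_append, List.infix_cons_iff]
    have hp : m <+: x :: c ↔ m = [] := by
      simpa using pv_prefix_append_cons x c m [] hx
    rw [hp, List.infix_nil]
  | cons y a' ih =>
    simp only [List.cons_append, List.infix_cons_iff]
    have hp := pv_prefix_append_cons x c m (y :: a') hx
    rw [List.cons_append] at hp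
    rw [hp, ih]
    tauto

-- per-line membership equals membership in the newline-joined text (char level)
theorem pv_isIn_join_chars (m : List Char) (hx : '\n' ∉ m) (hne : m ≠ []) :
    ∀ (bs : List (List Char)),
      PySem.Chars.isIn m (PySem.Chars.join ['\n'] bs)
        = bs.any (fun b => PySem.Chars.isIn m b) := by
  intro bs
  induction bs with
  | nil =>
    simp only [PySem.Chars.join_nil, List.any_nil]
    rw [PySem.Chars.isIn_eq_false_iff]
    intro hi
    exact hne (List.infix_nil.mp hi)
  | cons b rest ih =>
    cases rest with
    | nil => simp [PySem.Chars.join_singleton]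
    | cons b' rest' =>
      rw [PySem.Chars.join_cons_cons]
      have happ : (b ++ ['\n']) ++ PySem.Chars.join ['\n'] (b' :: rest')
          = b ++ '\n' :: PySem.Chars.join ['\n'] (b' :: rest') := by simp
      rw [happ, Bool.eq_iff_iff, PySem.Chars.isIn_iff_infix,
          pv_infix_append_cons '\n' _ m hx b,
          List.any_cons, ← ih, Bool.or_eq_true,
          PySem.Chars.isIn_iff_infix, PySem.Chars.isIn_iff_infix]

theorem pv_isIn_join (m : String) (hx : '\n' ∉ m.toList) (hne : m.toList ≠ []) (bs : List String) :
    PySem.Str.isIn m (PySem.Str.join "\n" bs) = bs.any (fun b => PySem.Str.isIn m b) := by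
  rw [PySem.Str.isIn_eq, PySem.Str.toList_join]
  have h : "\n".toList = ['\n'] := by decide
  rw [h, pv_isIn_join_chars m.toList hx hne (bs.map String.toList), List.any_map]
  simp [Function.comp_def, PySem.Str.isIn_eq]

-- any distributes over a pointwise or
theorem pv_any_or {α : Type} (f g : α → Bool) (l : List α) :
    l.any (fun x => f x || g x) = (l.any f || l.any g) := by
  induction l with
  | nil => simp
  | cons h t ih =>
    simp only [List.any_cons, ih]
    cases f h <;> cases g h <;> simp

-- A's block-level chrome test equals B's any-line test
theorem pv_chrome_eq (b : List String) :
    pvIsChromeA (PySem.Str.join "\n" b) = b.any pvLineChrome := by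
  unfold pvIsChromeA pvLineChrome pvChromeMarkers
  rw [pv_isIn_join _ (by decide) (by decide) b, pv_isIn_join _ (by decide) (by decide) b,
      pv_isIn_join _ (by decide) (by decide) b, pv_isIn_join _ (by decide) (by decide) b]
  simp only [List.any_cons, List.any_nil, Bool.or_false]
  rw [pv_any_or, pv_any_or, pv_any_or]
  simp only [show ∀ m : String, PySem.Str.isIn m = fun t => PySem.Chars.isIn m.toList t.toList
    from fun m => funext (fun t => PySem.Str.isIn_eq m t)]
  simp [Bool.or_assoc]

-- if no prefix rebalances the depth, A's loop emits nothing more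
theorem pv_fold_none : ∀ (lines : List String) (d : Int), pvBlockEnd d lines = none →
    ∀ (res blk : List String), (lines.foldl pvStepA (res, (blk, d))).1 = res := by
  intro lines
  induction lines with
  | nil => intro d _ res blk; simp
  | cons line rest ih =>
    intro d h res blk
    simp only [pvBlockEnd] at h
    by_cases hd : d + pvDelta line = 0
    · simp [hd] at h
    · simp only [if_neg hd] at h
      have hrest : pvBlockEnd (d + pvDelta line) rest = none := by
        cases hk : pvBlockEnd (d + pvDelta line) rest with
        | none => rfl
        | some k => rw [hk] at h; simp at h
      simp only [List.foldl_cons, pvStepA, pv_depthA_eq]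
      rw [if_neg (by simp [hd])]
      exact ih _ hrest res (blk ++ [line])

-- through the first balanced block, A's loop emits it (unless chrome) and resets
theorem pv_fold_some : ∀ (lines : List String) (d : Int) (n : Nat),
    pvBlockEnd d lines = some n →
    ∀ (res blk : List String),
      lines.foldl pvStepA (res, (blk, d))
        = (lines.drop n).foldl pvStepA
            (res ++ (if pvIsChromeA (PySem.Str.join "\n" (blk ++ lines.take n)) then []
                     else blk ++ lines.take n), ([], 0)) := by
  intro lines
  induction lines with
  | nil => intro d n h; simp [pvBlockEnd] at h
  | cons line rest ih =>
    intro d n h res blk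
    simp only [pvBlockEnd] at h
    by_cases hd : d + pvDelta line = 0
    · simp only [if_pos hd] at h
      obtain rfl : n = 1 := by injection h with h2; exact h2.symm
      simp only [List.foldl_cons, pvStepA, pv_depthA_eq]
      rw [if_pos ⟨hd, by simp⟩]
      simp only [List.take_succ_cons, List.take_zero, List.drop_succ_cons, List.drop_zero]
      by_cases hc : pvIsChromeA (PySem.Str.join "\n" (blk ++ [line]))
      · rw [if_pos hc, if_pos hc]; simp
      · rw [if_neg hc, if_neg hc]
    · simp only [if_neg hd] at h
      cases hk : pvBlockEnd (d + pvDelta line) rest with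
      | none => rw [hk] at h; simp at h
      | some k =>
        rw [hk] at h; simp only [Option.map_some] at h
        obtain rfl : n = k + 1 := by injection h with h2; exact h2.symm
        simp only [List.foldl_cons, pvStepA, pv_depthA_eq]
        rw [if_neg (by simp [hd])]
        rw [ih _ k hk res (blk ++ [line])]
        simp only [List.take_succ_cons, List.drop_succ_cons, List.append_assoc,
          List.cons_append, List.nil_append]

-- main: A's loop from a fresh block computes B's worklist loop
theorem pv_main : ∀ (N : Nat) (lines : List String), lines.length ≤ N →
    ∀ (res : List String),
      (lines.foldl pvStepA (res, (([] : List String), (0 : Int)))).1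
        = pvFilterGo res lines := by
  intro N
  induction N with
  | zero =>
    intro lines hl res
    obtain rfl : lines = [] := List.eq_nil_of_length_eq_zero (by omega)
    rw [pvFilterGo]
    simp [pvBlockEnd]
  | succ N ih =>
    intro lines hl res
    rw [pvFilterGo]
    cases h : pvBlockEnd 0 lines with
    | none =>
      rw [pv_fold_none lines 0 h res []]
    | some n =>
      have h1 := pvBlockEnd_ge_one 0 lines n h
      have h2 : lines ≠ [] := by rintro rfl; simp [pvBlockEnd] at h
      have h3 : 0 < lines.length := List.length_pos_iff.mpr h2
      have hle : (lines.drop n).length ≤ N := by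
        simp only [List.length_drop]; omega
      rw [pv_fold_some lines 0 n h res []]
      simp only [List.nil_append]
      rw [ih (lines.drop n) hle]
      rw [pv_chrome_eq]
      by_cases hc : (lines.take n).any pvLineChrome = true
      · simp [hc]
      · simp [hc]

-- ===== VERDICT =====
theorem filter_chrome_py_spec : Claim_equal_filter_chrome_py := by
  intro lines _
  unfold Spec_filter_chrome_py filter_chrome_py filter_chrome_py_alt
  rw [pv_main lines.length lines le_rfl []]
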